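-- pv_equiv track=rewrite | github.com/shehzanwar/PL-Predictor | features/form_features.py | _compute_streak_length
-- ===== SOURCE A (Python) =====
-- def _compute_streak_length(results: list[str]) -> list[int]:
--     """Compute the current streak length at each match (using only past data).
--
--     The streak at match N reflects the consecutive same-result count
--     from matches 1..N-1. Match 0 has streak 0.
--
--     Args:
--         results: Ordered list of result strings ("W", "D", "L").
--
--     Returns:
--         List of streak lengths, same length as input.
--     """
--     streaks: list[int] = [0]  # No streak before first match
--     for i in range(1, len(results)):
--         count = 0
--         prev_result = results[i - 1]
--         for j in range(i - 1, -1, -1):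
--             if results[j] == prev_result:
--                 count += 1
--             else:
--                 break
--         streaks.append(count)
--     return streaks
-- ===== SOURCE B (Python) =====
-- def _compute_streak_length(results: list[str]) -> list[int]:
--     """Single pass: maintain the running consecutive-run length instead of rescanning."""
--     streaks = [0]
--     run = 0
--     for i in range(1, len(results)):
--         if i >= 2 and results[i - 1] == results[i - 2]:
--             run += 1
--         else:
--             run = 1
--         streaks.append(run)
--     return streaks
-- ===== Notes on version B (the rewrite author's own statement) =====
-- stated objective: faster
-- what changed: Replaces the inner backwards rescan at every index with a single pass that maintains the running consecutive-run length.
import Mathlib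
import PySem

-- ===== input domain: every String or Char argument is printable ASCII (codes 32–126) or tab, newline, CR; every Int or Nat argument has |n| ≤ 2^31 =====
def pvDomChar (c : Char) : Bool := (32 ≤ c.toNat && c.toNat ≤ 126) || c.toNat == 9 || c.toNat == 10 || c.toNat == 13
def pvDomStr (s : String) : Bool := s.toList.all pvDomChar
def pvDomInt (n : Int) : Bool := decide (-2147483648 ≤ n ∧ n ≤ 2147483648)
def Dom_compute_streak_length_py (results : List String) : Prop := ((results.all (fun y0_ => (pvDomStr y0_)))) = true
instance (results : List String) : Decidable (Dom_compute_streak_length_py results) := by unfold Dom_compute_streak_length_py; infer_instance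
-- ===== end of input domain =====

-- B replaces A's quadratic backwards rescan at each index with a single pass
-- maintaining the running consecutive-run length (objective: faster, asymptotic).


-- ===== PORT A =====
-- inner loop 'for j in range(i-1,-1,-1): if results[j]==prev: count+=1 else: break',
-- written as count-down recursion on the current index j (j is always in range in A,
-- so results.getD j "" is exactly Python's results[j] here).
def pvCountBack (results : List String) (prev : String) : Nat → Int
  | 0 => if results.getD 0 "" = prev then 1 else 0
  | (j+1) => if results.getD (j+1) "" = prev then 1 + pvCountBack results prev j else 0

-- 'for i in range(1, len(results))' as a fold over [1, …, len-1]
def compute_streak_length_py (results : List String) : List Int :=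
  (List.range' 1 (results.length - 1)).foldl
    (fun streaks i =>
      streaks ++ [pvCountBack results (results.getD (i - 1) "") (i - 1)])
    [0]

-- ===== PORT B =====
-- single pass over the same indices carrying (streaks, run)
def compute_streak_length_py_alt (results : List String) : List Int :=
  ((List.range' 1 (results.length - 1)).foldl
    (fun (st : List Int × Int) i =>
      let run : Int :=
        if 2 ≤ i ∧ results.getD (i - 1) "" = results.getD (i - 2) "" then st.2 + 1 else 1
      (st.1 ++ [run], run))
    ([0], 0)).1

-- ===== PRECONDITION & SPEC =====
def Spec_compute_streak_length_py (results : List String) (out : List Int) : Prop := out = compute_streak_length_py_alt results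
instance (results : List String) (out : List Int) : Decidable (Spec_compute_streak_length_py results out) := by unfold Spec_compute_streak_length_py; infer_instance

-- ===== CLAIM (what is proved, stated in full; the proofs are below) =====
def Claim_equal_compute_streak_length_py : Prop := ∀ (results : List String), Dom_compute_streak_length_py results → Spec_compute_streak_length_py results (compute_streak_length_py results)

-- ===== LEMMAS AND PROOFS =====

-- key step: the backwards count at index k+1 satisfies B's recurrence
theorem pvCountBack_step (results : List String) (k : Nat) :
    pvCountBack results (results.getD (k+1) "") (k+1) =
      if results.getD (k+1) "" = results.getD k "" then
        pvCountBack results (results.getD k "") k + 1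
      else 1 := by
  have h1 : pvCountBack results (results.getD (k+1) "") (k+1)
      = 1 + pvCountBack results (results.getD (k+1) "") k := by
    rw [pvCountBack, if_pos rfl]
  rw [h1]
  by_cases h : results.getD (k+1) "" = results.getD k ""
  · rw [if_pos h, h]; omega
  · rw [if_neg h]
    have hz : pvCountBack results (results.getD (k+1) "") k = 0 := by
      cases k with
      | zero => rw [pvCountBack, if_neg (fun hh => h hh.symm)]
      | succ m => rw [pvCountBack, if_neg (fun hh => h hh.symm)]
    rw [hz]; norm_num

-- fold invariant: the lists agree, and B's carried run equals A's count for the last index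
theorem pvFold_inv (results : List String) (k : Nat) :
    ((List.range' 1 k).foldl
      (fun streaks i =>
        streaks ++ [pvCountBack results (results.getD (i - 1) "") (i - 1)]) [0]
      = ((List.range' 1 k).foldl
          (fun (st : List Int × Int) i =>
            let run : Int :=
              if 2 ≤ i ∧ results.getD (i - 1) "" = results.getD (i - 2) "" then st.2 + 1 else 1
            (st.1 ++ [run], run)) ([0], 0)).1)
    ∧ (1 ≤ k →
        ((List.range' 1 k).foldl
          (fun (st : List Int × Int) i =>
            let run : Int :=
              if 2 ≤ i ∧ results.getD (i - 1) "" = results.getD (i - 2) "" then st.2 + 1 else 1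
            (st.1 ++ [run], run)) ([0], 0)).2
        = pvCountBack results (results.getD (k - 1) "") (k - 1)) := by
  induction k with
  | zero => simp
  | succ k ih =>
    have hr : List.range' 1 (k+1) = List.range' 1 k ++ [1 + k] := List.range'_1_concat ..
    rw [hr, List.foldl_append, List.foldl_append]
    rcases ih with ⟨ih1, ih2⟩
    cases k with
    | zero =>
      constructor
      · simp [pvCountBack]
      · intro _; simp [pvCountBack]
    | succ m =>
      have h2 : 2 ≤ 1 + (m + 1) := by omega
      have hrun := ih2 (by omega)
      simp only [List.foldl_cons, List.foldl_nil]
      rw [show 1 + (m + 1) - 1 = m + 1 by omega, show 1 + (m + 1) - 2 = m by omega]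
      rw [show m + 1 - 1 = m from rfl] at hrun
      by_cases h : results.getD (m + 1) "" = results.getD m ""
      · rw [if_pos ⟨h2, h⟩]
        have e1 := pvCountBack_step results m
        rw [if_pos h, ← hrun] at e1
        refine ⟨by rw [ih1, e1], fun _ => ?_⟩
        rw [show m + 1 + 1 - 1 = m + 1 from rfl]
        exact e1.symm
      · rw [if_neg (fun hc => h hc.2)]
        have e1 := pvCountBack_step results m
        rw [if_neg h] at e1
        refine ⟨by rw [ih1, e1], fun _ => ?_⟩
        rw [show m + 1 + 1 - 1 = m + 1 from rfl]
        exact e1.symm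

-- ===== VERDICT (by name: the statement is the Claim_ definition above) =====
theorem compute_streak_length_py_spec : Claim_equal_compute_streak_length_py := by
  intro results _
  unfold Spec_compute_streak_length_py compute_streak_length_py compute_streak_length_py_alt
  exact (pvFold_inv results (results.length - 1)).1
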